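-- pv_equiv track=rewrite | github.com/hungnmai/keyword2title | ai/bart_kw_title.py | locate_words_in_text
-- ===== SOURCE A (Python) =====
-- def locate_words_in_text(word, text):
--     result = []
--     index = 0
--     w_leng = len(word)
--     while index < len(text):
--         m_index = text.find(word, index)
--         if m_index >= 0:
--             end_index = m_index + w_leng - 1
--             result.append((m_index, end_index))
--             index = end_index + 1
--         else:
--             break
--     return result
-- ===== SOURCE B (Python) =====
-- def locate_words_in_text(word, text):
--     # Stage 1: enumerate every (possibly overlapping) occurrence position.
--     w = len(word)
--     matches = [i for i in range(len(text)) if text[i:i+w] == word]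
--     # Stage 2: greedy non-overlapping interval selection over the candidates.
--     result = []
--     next_free = 0
--     for i in matches:
--         if i >= next_free:
--             result.append((i, i + w - 1))
--             next_free = i + w
--     return result
-- ===== Notes on version B (the rewrite author's own statement) =====
-- stated objective: alternative
-- what changed: Replaced A's single find()-jumping while loop by a two-stage pipeline: first enumerate all (overlapping) candidate occurrence positions by slice comparison, then a separate greedy interval-selection pass picks the non-overlapping ones.
import Mathlib
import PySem

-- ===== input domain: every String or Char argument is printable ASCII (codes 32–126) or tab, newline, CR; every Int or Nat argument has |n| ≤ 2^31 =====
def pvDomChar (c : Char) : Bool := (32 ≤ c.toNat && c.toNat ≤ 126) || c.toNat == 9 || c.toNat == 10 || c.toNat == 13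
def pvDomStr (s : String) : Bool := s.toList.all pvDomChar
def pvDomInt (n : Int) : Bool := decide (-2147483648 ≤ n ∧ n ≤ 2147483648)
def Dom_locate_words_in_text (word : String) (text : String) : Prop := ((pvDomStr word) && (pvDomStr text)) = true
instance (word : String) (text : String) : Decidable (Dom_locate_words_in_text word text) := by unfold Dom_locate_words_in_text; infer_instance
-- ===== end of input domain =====

-- B replaces A's find()-jumping while loop by a two-stage pipeline: enumerate all candidate
-- occurrence positions, then a separate greedy pass selects the non-overlapping ones (alternative, same cost).

-- ===== PORT A =====
-- A's while loop as fuel recursion on the running index (fuel = |text| + 1 suffices: on Pre_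
-- inputs each iteration raises the index by at least one; outside Pre_ Python A diverges).
def pvGoA (w t : List Char) (fuel : Nat) (index : Nat) : List (Int × Int) :=
  match fuel with
  | 0 => []
  | fuel + 1 =>
    if index < t.length then
      let m := PySem.Chars.findFrom t w (index : Int) none
      if 0 ≤ m then
        ((m, m + (w.length : Int) - 1)) :: pvGoA w t fuel (m.toNat + w.length)
      else []
    else []

def locate_words_in_text (word : String) (text : String) : List (Int × Int) :=
  pvGoA word.toList text.toList (text.toList.length + 1) 0

-- ===== PORT B =====
-- stage 1: the comprehension [i for i in range(len(text)) if text[i:i+w] == word]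
def pvMatchesB (w t : List Char) : List Nat :=
  (List.range t.length).filter
    (fun i => PySem.List.slice t (some (i : Int)) (some ((i : Int) + (w.length : Int))) == w)

-- stage 2: one step of the greedy for-loop (state = (result, next_free))
def pvGreedyStep (wn : Nat) (st : List (Int × Int) × Nat) (i : Nat) : List (Int × Int) × Nat :=
  if st.2 ≤ i then (st.1 ++ [((i : Int), (i : Int) + (wn : Int) - 1)], i + wn) else st

def locate_words_in_text_alt (word : String) (text : String) : List (Int × Int) :=
  ((pvMatchesB word.toList text.toList).foldl (pvGreedyStep word.toList.length) ([], 0)).1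

-- ===== PRECONDITION & SPEC =====
-- Pre_ excludes word = "" with text ≠ "": there Python A never advances the index and loops forever.
def Pre_locate_words_in_text (word : String) (text : String) : Prop := word ≠ "" ∨ text = ""
instance (word : String) (text : String) : Decidable (Pre_locate_words_in_text word text) := by unfold Pre_locate_words_in_text; infer_instance
def pvWitness_locate_words_in_text : String × String := ("ab", "cabab")

def Spec_locate_words_in_text (word : String) (text : String) (out : List (Int × Int)) : Prop := out = locate_words_in_text_alt word text
instance (word : String) (text : String) (out : List (Int × Int)) : Decidable (Spec_locate_words_in_text word text out) := by unfold Spec_locate_words_in_text; infer_instance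

-- ===== CLAIM (what is proved, stated in full; the proofs are below) =====
def Claim_equal_locate_words_in_text : Prop := ∀ (word : String) (text : String), Dom_locate_words_in_text word text → Pre_locate_words_in_text word text → Spec_locate_words_in_text word text (locate_words_in_text word text)

-- ===== LEMMAS AND PROOFS =====

-- recursive form of B's greedy pass (proof helper)
def pvGreedy (wn : Nat) : List Nat → Nat → List (Int × Int)
  | [], _ => []
  | i :: rest, f =>
    if f ≤ i then ((i : Int), (i : Int) + (wn : Int) - 1) :: pvGreedy wn rest (i + wn)
    else pvGreedy wn rest f

lemma pvFoldl_greedy (wn : Nat) :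
    ∀ (M : List Nat) (acc : List (Int × Int)) (f : Nat),
      (M.foldl (pvGreedyStep wn) (acc, f)).1 = acc ++ pvGreedy wn M f := by
  intro M
  induction M with
  | nil => intro acc f; simp [pvGreedy]
  | cons i rest ih =>
    intro acc f
    simp only [List.foldl_cons, pvGreedyStep, pvGreedy]
    by_cases h : f ≤ i
    · rw [if_pos h, if_pos h, ih]; simp
    · rw [if_neg h, if_neg h, ih]

lemma pvGreedy_nil (wn : Nat) :
    ∀ (M : List Nat) (f : Nat), (∀ i ∈ M, i < f) → pvGreedy wn M f = [] := by
  intro M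
  induction M with
  | nil => intro f _; rfl
  | cons i rest ih =>
    intro f h
    have : ¬ f ≤ i := by have := h i (by simp); omega
    simp only [pvGreedy, if_neg this]
    exact ih f (fun j hj => h j (by simp [hj]))

lemma pvGreedy_shift (wn : Nat) :
    ∀ (M : List Nat) (f f' : Nat), f ≤ f' → (∀ i ∈ M, ¬ (f ≤ i ∧ i < f')) →
      pvGreedy wn M f = pvGreedy wn M f' := by
  intro M
  induction M with
  | nil => intro _ _ _ _; rfl
  | cons i rest ih =>
    intro f f' hff hno
    have hi := hno i (by simp)
    by_cases h : f ≤ i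
    · have h' : f' ≤ i := by omega
      simp only [pvGreedy, if_pos h, if_pos h']
    · have h' : ¬ f' ≤ i := by omega
      simp only [pvGreedy, if_neg h, if_neg h']
      exact ih f f' hff (fun j hj => hno j (by simp [hj]))

-- taking a member: if f ∈ M (M strictly sorted) then the greedy from f emits f's span
lemma pvGreedy_take (wn : Nat) (hw : 0 < wn) :
    ∀ (M : List Nat) (f : Nat), M.Pairwise (· < ·) → f ∈ M →
      pvGreedy wn M f = ((f : Int), (f : Int) + (wn : Int) - 1) :: pvGreedy wn M (f + wn) := by
  intro M
  induction M with
  | nil => intro f _ h; simp at h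
  | cons i rest ih =>
    intro f hsort hf
    rcases List.mem_cons.mp hf with rfl | hf'
    · have : f ≤ f := le_rfl
      simp only [pvGreedy, if_pos this]
      have : ¬ f + wn ≤ f := by omega
      rw [if_neg this]
    · have hlt : i < f := (List.pairwise_cons.mp hsort).1 f hf'
      have h1 : ¬ f ≤ i := by omega
      have h2 : ¬ f + wn ≤ i := by omega
      simp only [pvGreedy, if_neg h1, if_neg h2]
      exact ih f (List.pairwise_cons.mp hsort).2 hf'

-- membership in the candidate list ↔ the word is a prefix of the suffix at i (and i < |t|)
lemma pvMem_matchesB (w t : List Char) (i : Nat) :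
    i ∈ pvMatchesB w t ↔ i < t.length ∧ w <+: t.drop i := by
  unfold pvMatchesB
  rw [List.mem_filter, List.mem_range]
  constructor
  · rintro ⟨h1, h2⟩
    refine ⟨h1, ?_⟩
    rw [PySem.List.slice_natCast_add] at h2
    have h2' : (t.drop i).take w.length = w := by exact_mod_cast eq_of_beq h2
    exact (List.prefix_iff_eq_take.mpr h2'.symm)
  · rintro ⟨h1, h2⟩
    refine ⟨h1, ?_⟩
    rw [PySem.List.slice_natCast_add]
    have := List.prefix_iff_eq_take.mp h2
    exact beq_iff_eq.mpr this.symm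

lemma pvMatchesB_sorted (w t : List Char) : (pvMatchesB w t).Pairwise (· < ·) :=
  (List.pairwise_lt_range).filter _

lemma pvGoA_stop (w t : List Char) (f i : Nat) (h : ¬ i < t.length) : pvGoA w t f i = [] := by
  cases f with
  | zero => rfl
  | succ f => simp only [pvGoA, if_neg h]

-- main lemma: A's find-jump loop equals B's greedy over all candidates, from any index
lemma pvGoA_eq_greedy (w t : List Char) (hw : w ≠ []) :
    ∀ (fuel f : Nat), t.length - f < fuel →
      pvGoA w t fuel f = pvGreedy w.length (pvMatchesB w t) f := by
  have hwlen : 0 < w.length := List.length_pos_iff.mpr hw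
  intro fuel
  induction fuel with
  | zero => intro f h; omega
  | succ fuel ih =>
    intro f hf
    by_cases hi : f < t.length
    · simp only [pvGoA, if_pos hi]
      set m := PySem.Chars.findFrom t w (f : Int) none with hm_def
      have hile : f ≤ t.length := le_of_lt hi
      by_cases hm : 0 ≤ m
      · have hmne : m ≠ -1 := by omega
        obtain ⟨h1, h2, h3⟩ := PySem.Chars.findFrom_natCast_spec t w f hile hmne
        rw [if_pos hm]
        set k := m.toNat with hk_def
        have hmk : m = (k : Int) := (Int.toNat_of_nonneg hm).symm
        have hik : f ≤ k := by omega
        have hklen : k < t.length := by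
          by_contra hc
          have : t.drop k = [] := List.drop_eq_nil_of_le (by omega)
          rw [this] at h2
          exact hw (List.prefix_nil.mp h2)
        have hkmem : k ∈ pvMatchesB w t := (pvMem_matchesB w t k).mpr ⟨hklen, h2⟩
        have hshift : pvGreedy w.length (pvMatchesB w t) f
            = pvGreedy w.length (pvMatchesB w t) k := by
          refine pvGreedy_shift _ _ f k hik ?_
          rintro j hj ⟨hfj, hjk⟩
          exact h3 j hfj hjk ((pvMem_matchesB w t j).mp hj).2
        rw [hshift, pvGreedy_take w.length hwlen _ k (pvMatchesB_sorted w t) hkmem, hmk]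
        congr 1
        exact ih (k + w.length) (by omega)
      · have hm1 : m = -1 := by
          have := PySem.Chars.findFrom_natCast t w f hile
          rw [← hm_def] at this
          by_cases hfind : PySem.Chars.find (t.drop f) w = -1
          · rw [this, if_pos hfind]
          · exfalso
            have hge := PySem.Chars.neg_one_le_find (t.drop f) w
            rw [this, if_neg hfind] at hm
            omega
        have hno : ¬ w <:+: t.drop f := by
          have := PySem.Chars.findFrom_natCast_eq_neg_one_iff t w f hile
          rw [← hm_def] at this
          exact this.mp hm1
        rw [if_neg hm]
        refine (pvGreedy_nil _ _ f ?_).symm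
        intro j hj
        by_contra hc
        have hfj : f ≤ j := by omega
        obtain ⟨hjlen, hpre⟩ := (pvMem_matchesB w t j).mp hj
        have h2 : t.drop j = (t.drop f).drop (j - f) := by
          rw [List.drop_drop]; congr 1; omega
        exact hno (List.IsInfix.trans (h2 ▸ hpre.isInfix)
          (List.drop_suffix (j - f) (t.drop f)).isInfix)
    · rw [pvGoA_stop w t _ f hi]
      refine (pvGreedy_nil _ _ f ?_).symm
      intro j hj
      have := ((pvMem_matchesB w t j).mp hj).1
      omega

-- ===== VERDICT (by name: the statement is the Claim_ definition above) =====
theorem locate_words_in_text_spec : Claim_equal_locate_words_in_text := by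
  intro word text _ hpre
  unfold Spec_locate_words_in_text locate_words_in_text locate_words_in_text_alt
  rw [pvFoldl_greedy]
  rcases hpre with hw | ht
  · have hwl : word.toList ≠ [] := by
      intro h; exact hw (by simpa using h)
    simpa using pvGoA_eq_greedy word.toList text.toList hwl (text.toList.length + 1) 0 (by omega)
  · subst ht
    simp [pvGoA_stop, pvMatchesB, pvGreedy]
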